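-- pv_equiv track=rewrite | github.com/cthacker-udel/ProgrammingProblems | pythonProblems/countPhotos/countPhotos.py | count_photos
-- ===== SOURCE A (Python) =====
-- def count_photos(road):
--     _ct = 0
--     _left = 0
--     _right = 0
--     _i = 0
--     _j = len(road) - 1
--     while _i < len(road) or _j >= 0:
--         if road[_i] == '.':
--             _ct += _right
--         elif road[_i] == '>':
--             _right += 1
--
--         if road[_j] == '.':
--             _ct += _left
--         elif road[_j] == '<':
--             _left += 1
--         _i += 1
--         _j -= 1
--     return _ct
-- ===== SOURCE B (Python) =====
-- def count_photos(road):
--     dots = [i for i, c in enumerate(road) if c == '.']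
--     total = 0
--     for i, c in enumerate(road):
--         if c == '>':
--             total += sum(1 for d in dots if d > i)
--         elif c == '<':
--             total += sum(1 for d in dots if d < i)
--     return total
-- ===== Notes on version B (the rewrite author's own statement) =====
-- stated objective: alternative
-- what changed: B is camera-centric with an index data structure: it first materialises the list of '.'-positions, then for each camera counts the qualifying dot indices in that list ('>' counts dots at larger indices, '<' at smaller); A is a dot-centric two-pointer sweep maintaining running camera counters and adding them at each '.'.
import Mathlib
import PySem

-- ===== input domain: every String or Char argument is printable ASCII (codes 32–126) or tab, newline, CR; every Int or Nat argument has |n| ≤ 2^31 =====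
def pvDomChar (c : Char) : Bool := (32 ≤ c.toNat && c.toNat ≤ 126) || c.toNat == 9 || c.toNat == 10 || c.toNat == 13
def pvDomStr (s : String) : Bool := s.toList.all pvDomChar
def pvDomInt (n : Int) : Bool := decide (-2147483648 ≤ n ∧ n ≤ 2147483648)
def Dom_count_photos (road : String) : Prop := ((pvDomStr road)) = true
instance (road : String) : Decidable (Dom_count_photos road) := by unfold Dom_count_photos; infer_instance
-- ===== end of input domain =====

-- B replaces A's dot-centric two-pointer sweep by a camera-centric algorithm over a list of dot indices (alternative algorithm, not faster).


-- ===== PORT A =====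
-- literal port of A's while-loop; the '.getD ∅' defaults only totalize the indexing:
-- on every reached state both indices are in range (i + j = len - 1), matching Python.
-- fuel = cs.length is exactly the number of loop iterations (i runs 0..len-1, j runs len-1..0
-- in lockstep); it only makes the recursion structural and never cuts the loop short.
def countPhotosLoopA (cs : List Char) (fuel : Nat) (i : Nat) (j : Int) (ct left right : Int) : Int :=
  match fuel with
  | 0 => ct
  | k + 1 =>
  if i < cs.length ∨ 0 ≤ j then
    let ci := (PySem.List.pyGet? cs (i : Int)).getD ' '
    let ct1 := if ci = '.' then ct + right else ct
    let right1 := if ci = '.' then right else if ci = '>' then right + 1 else right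
    let cj := (PySem.List.pyGet? cs j).getD ' '
    let ct2 := if cj = '.' then ct1 + left else ct1
    let left1 := if cj = '.' then left else if cj = '<' then left + 1 else left
    countPhotosLoopA cs k (i + 1) (j - 1) ct2 left1 right1
  else ct

def count_photos (road : String) : Int :=
  countPhotosLoopA road.toList road.toList.length 0 ((road.toList.length : Int) - 1) 0 0 0

-- ===== PORT B =====
-- the '.'-position index list: [i for i, c in enumerate(road) if c == '.']
def pvDots (cs : List Char) : List Int :=
  (PySem.List.enumerate cs).filterMap (fun p => if p.2 = '.' then some p.1 else none)

-- loop body: at '>' add the dots at larger indices, at '<' the dots at smaller indices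
def pvCamStep (dots : List Int) (total : Int) (p : Int × Char) : Int :=
  if p.2 = '>' then total + ((dots.filter (fun d => p.1 < d)).length : Int)
  else if p.2 = '<' then total + ((dots.filter (fun d => d < p.1)).length : Int)
  else total

def count_photos_alt (road : String) : Int :=
  let cs := road.toList
  let dots := pvDots cs
  (PySem.List.enumerate cs).foldl (pvCamStep dots) 0

-- ===== PRECONDITION & SPEC =====
def Spec_count_photos (road : String) (out : Int) : Prop := out = count_photos_alt road
instance (road : String) (out : Int) : Decidable (Spec_count_photos road out) := by unfold Spec_count_photos; infer_instance

-- ===== CLAIM (what is proved, stated in full; the proofs are below) =====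
def Claim_equal_count_photos : Prop := ∀ (road : String), Dom_count_photos road → Spec_count_photos road (count_photos road)

-- ===== LEMMAS AND PROOFS =====

-- total photo count a pass contributes in A: running counter r, bumped at sym, added at '.'
def photoSum (sym : Char) : List Char → Int → Int
  | [], _ => 0
  | c :: t, r =>
      if c = '.' then r + photoSum sym t r
      else if c = sym then photoSum sym t (r + 1)
      else photoSum sym t r

-- camera-centric sums: each '>' gets the dot count of its tail …
def Sgreat : List Char → Int
  | [] => 0
  | c :: t => (if c = '>' then ((t.count '.' : Nat) : Int) else 0) + Sgreat t

-- … and each '<' gets the running dot count b before it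
def Sless : List Char → Int → Int
  | [], _ => 0
  | c :: t, b => (if c = '<' then b else 0) + Sless t (b + (if c = '.' then 1 else 0))

theorem loopA_eq (cs : List Char) :
    ∀ (s : List Char) (fuel i : Nat) (ct l r : Int), cs.drop i = s →
      cs.length ≤ i + fuel →
      countPhotosLoopA cs fuel i ((cs.length : Int) - 1 - i) ct l r =
        ct + photoSum '>' (cs.drop i) r
           + photoSum '<' ((cs.take (cs.length - i)).reverse) l := by
  intro s
  induction s with
  | nil =>
      intro fuel i ct l r hdrop hfuel
      have hi : cs.length ≤ i := by
        by_contra h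
        have := cs.drop_eq_nil_iff.mp hdrop
        omega
      have h1 : cs.length - i = 0 := by omega
      cases fuel with
      | zero => simp [countPhotosLoopA, hdrop, h1, photoSum]
      | succ k =>
          rw [countPhotosLoopA]
          rw [if_neg (by omega)]
          simp [hdrop, h1, photoSum]
  | cons a s' ih =>
      intro fuel i ct l r hdrop hfuel
      have hi : i < cs.length := by
        by_contra h
        rw [List.drop_eq_nil_of_le (by omega)] at hdrop
        exact (List.cons_ne_nil a s') hdrop.symm
      set n := cs.length with hn
      rw [List.drop_eq_getElem_cons hi] at hdrop
      simp only [List.cons.injEq] at hdrop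
      obtain ⟨-, hdrop'⟩ := hdrop
      have hj : ((n : Int) - 1 - i) = ((n - (i + 1) : Nat) : Int) := by omega
      obtain ⟨k, rfl⟩ : ∃ k, fuel = k + 1 := ⟨fuel - 1, by omega⟩
      rw [countPhotosLoopA, if_pos (Or.inl hi)]
      have hgi : PySem.List.pyGet? cs (i : Int) = some cs[i] :=
        PySem.List.pyGet?_ofNat cs i (by omega)
      have hgj : PySem.List.pyGet? cs ((n : Int) - 1 - i) = some cs[n - (i + 1)] := by
        rw [hj]; exact PySem.List.pyGet?_ofNat cs (n - (i + 1)) (by omega)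
      have hstep : ((n : Int) - 1 - i) - 1 = (n : Int) - 1 - (i + 1 : Nat) := by
        push_cast; ring
      rw [hgi, hgj, hstep, ih k (i + 1) _ _ _ hdrop' (by omega)]
      have hdcons : cs.drop i = cs[i] :: cs.drop (i + 1) := List.drop_eq_getElem_cons hi
      have htake : cs.take (n - i) = cs.take (n - (i + 1)) ++ [cs[n - (i + 1)]] := by
        have h2 : n - i = (n - (i + 1)) + 1 := by omega
        rw [h2, List.take_add_one]
        simp [List.getElem?_eq_getElem (by omega : n - (i + 1) < cs.length)]
      rw [hdcons, htake, List.reverse_append]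
      simp only [Option.getD_some, List.reverse_singleton, List.singleton_append, photoSum]
      split_ifs <;> omega

theorem count_photos_eq_sums (road : String) :
    count_photos road =
      photoSum '>' road.toList 0 + photoSum '<' road.toList.reverse 0 := by
  unfold count_photos
  have h := loopA_eq road.toList road.toList road.toList.length 0 0 0 0 (by simp) (by omega)
  simp only [Nat.sub_zero, List.drop_zero, List.take_length,
    CharP.cast_eq_zero, sub_zero] at h ⊢
  simpa using h

theorem photoSum_append (sym : Char) (hsym : sym ≠ '.') :
    ∀ (xs ys : List Char) (r : Int),
      photoSum sym (xs ++ ys) r = photoSum sym xs r + photoSum sym ys (r + (xs.count sym : Nat)) := by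
  intro xs
  induction xs with
  | nil => intro ys r; simp [photoSum]
  | cons c t ih =>
      intro ys r
      by_cases h1 : c = '.'
      · subst h1
        simp [List.cons_append, photoSum, ih, List.count_cons, Ne.symm hsym] <;> ring
      · by_cases h2 : c = sym
        · subst h2
          simp [List.cons_append, photoSum, ih, List.count_cons, h1] <;> ring_nf
        · simp [List.cons_append, photoSum, ih, List.count_cons, h1, h2]

theorem photoSum_gt (cs : List Char) :
    ∀ r : Int, photoSum '>' cs r = Sgreat cs + r * ((cs.count '.' : Nat) : Int) := by
  induction cs with
  | nil => intro r; simp [photoSum, Sgreat]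
  | cons c t ih =>
      intro r
      by_cases h1 : c = '.'
      · subst h1
        simp only [photoSum, if_pos rfl, Sgreat, ih]
        rw [List.count_cons]
        simp; ring
      · by_cases h2 : c = '>'
        · subst h2
          simp only [photoSum, Sgreat, if_neg h1, if_pos rfl, ih]
          rw [List.count_cons]
          simp [h1]; ring
        · simp only [photoSum, Sgreat, if_neg h1, if_neg h2, ih]
          rw [List.count_cons]
          simp [h1]

theorem Sless_shift (cs : List Char) :
    ∀ b : Int, Sless cs b = Sless cs 0 + b * ((cs.count '<' : Nat) : Int) := by
  induction cs with
  | nil => intro b; simp [Sless]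
  | cons c t ih =>
      intro b
      simp only [Sless]
      rw [ih (b + if c = '.' then 1 else 0), ih ((0:Int) + if c = '.' then 1 else 0),
        List.count_cons]
      by_cases h1 : c = '<'
      · subst h1; simp; ring
      · simp [h1]
        split_ifs <;> ring

theorem photoSum_lt (cs : List Char) :
    ∀ r : Int, photoSum '<' cs.reverse r = Sless cs 0 + r * ((cs.count '.' : Nat) : Int) := by
  induction cs with
  | nil => intro r; simp [photoSum, Sless]
  | cons c t ih =>
      intro r
      rw [List.reverse_cons, photoSum_append '<' (by decide) t.reverse [c] r, ih]
      simp only [Sless, List.count_cons, List.count_reverse]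
      rw [Sless_shift t ((0:Int) + if c = '.' then 1 else 0)]
      by_cases h1 : c = '.'
      · subst h1
        simp [photoSum]; push_cast; ring
      · by_cases h2 : c = '<'
        · subst h2
          simp [photoSum, h1]
        · simp [photoSum, h1, h2]

-- the dot-index list of t, enumerated from s, decomposes structurally
theorem dotsF_cons (c : Char) (t : List Char) (s : Int) :
    (PySem.List.enumerate (c :: t) s).filterMap (fun p => if p.2 = '.' then some p.1 else none)
      = (if c = '.' then [s] else [])
        ++ (PySem.List.enumerate t (s + 1)).filterMap (fun p => if p.2 = '.' then some p.1 else none) := by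
  rw [PySem.List.enumerate_cons]
  by_cases h : c = '.' <;> simp [List.filterMap_cons, h]

-- dots at indices > k among the indices ≥ s are the dots of drop (k+1-s)
theorem count_gt (t : List Char) :
    ∀ (s k : Nat),
      (((PySem.List.enumerate t (s : Int)).filterMap
          (fun p => if p.2 = '.' then some p.1 else none)).filter
            (fun d => (k : Int) < d)).length
        = (t.drop (k + 1 - s)).count '.' := by
  induction t with
  | nil => intro s k; simp [PySem.List.enumerate]
  | cons c t ih =>
      intro s k
      rw [dotsF_cons, List.filter_append, List.length_append]
      have hcast : ((s : Int) + 1) = ((s + 1 : Nat) : Int) := by push_cast; ring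
      rw [hcast, ih (s + 1) k]
      by_cases hks : k < s
      · have h0 : k + 1 - s = 0 := by omega
        have h0' : k + 1 - (s + 1) = 0 := by omega
        rw [h0, h0']
        by_cases h : c = '.'
        · simp [h, Int.ofNat_lt.mpr hks] <;> omega
        · simp [h]
      · have hlt : ¬ ((k : Int) < (s : Int)) := by
          simp only [not_lt]; exact_mod_cast Nat.not_lt.mp hks
        have h1 : k + 1 - s = (k - s) + 1 := by omega
        have h2 : k + 1 - (s + 1) = k - s := by omega
        rw [h1, h2]
        by_cases h : c = '.' <;> simp [h, hlt, List.drop_succ_cons]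
      
-- dots at indices < k among the indices ≥ s are the dots of take (k-s)
theorem count_lt (t : List Char) :
    ∀ (s k : Nat),
      (((PySem.List.enumerate t (s : Int)).filterMap
          (fun p => if p.2 = '.' then some p.1 else none)).filter
            (fun d => d < (k : Int))).length
        = (t.take (k - s)).count '.' := by
  induction t with
  | nil => intro s k; simp [PySem.List.enumerate]
  | cons c t ih =>
      intro s k
      rw [dotsF_cons, List.filter_append, List.length_append]
      have hcast : ((s : Int) + 1) = ((s + 1 : Nat) : Int) := by push_cast; ring
      rw [hcast, ih (s + 1) k]
      by_cases hks : s < k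
      · have h1 : k - s = (k - (s + 1)) + 1 := by omega
        rw [h1, List.take_succ_cons]
        by_cases h : c = '.'
        · simp [h, Int.ofNat_lt.mpr hks] <;> omega
        · simp [h]
      · have h0 : k - s = 0 := by omega
        have h0' : k - (s + 1) = 0 := by omega
        have hlt : ¬ ((s : Int) < (k : Int)) := by
          simp only [not_lt]; exact_mod_cast Nat.not_lt.mp hks
        rw [h0, h0']
        by_cases h : c = '.' <;> simp [h, hlt]

-- the B fold, from index k onward, adds the camera-centric sums of the suffix
theorem foldB_eq (cs : List Char) :
    ∀ (t : List Char) (k : Nat) (acc : Int), cs.drop k = t →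
      (PySem.List.enumerate t (k : Int)).foldl (pvCamStep (pvDots cs)) acc
        = acc + Sgreat t + Sless t (((cs.take k).count '.' : Nat) : Int) := by
  intro t
  induction t with
  | nil => intro k acc hdrop; simp [PySem.List.enumerate, Sgreat, Sless]
  | cons c t' ih =>
      intro k acc hdrop
      have hk : k < cs.length := by
        by_contra h
        rw [List.drop_eq_nil_of_le (by omega)] at hdrop
        exact (List.cons_ne_nil c t') hdrop.symm
      have hdrop' : cs.drop (k + 1) = t' := by
        have : (cs.drop k).drop 1 = t'.drop 0 := by rw [hdrop]; simp [List.drop_succ_cons]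
        simpa [List.drop_drop, Nat.add_comm] using this
      have hget : cs[k]? = some c := by
        have h0 : (cs.drop k)[0]? = some c := by rw [hdrop]; simp
        rw [List.getElem?_drop] at h0
        simpa using h0
      rw [PySem.List.enumerate_cons, List.foldl_cons]
      have hstep : pvCamStep (pvDots cs) acc ((k : Int), c)
          = acc + (if c = '>' then (((cs.drop (k+1)).count '.' : Nat) : Int) else 0)
                + (if c = '<' then (((cs.take k).count '.' : Nat) : Int) else 0) := by
        unfold pvCamStep pvDots
        have hgt := count_gt cs 0 k
        have hlt := count_lt cs 0 k
        simp only [Nat.cast_zero, Nat.add_sub_cancel, Nat.sub_zero] at hgt hlt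
        by_cases h1 : c = '>'
        · simp [h1, hgt]
        · by_cases h2 : c = '<'
          · simp [h1, h2, hlt]
          · simp [h1, h2]
      have hcast : ((k : Int) + 1) = ((k + 1 : Nat) : Int) := by push_cast; ring
      rw [hstep, hcast, ih (k + 1) _ hdrop']
      have htake : cs.take (k + 1) = cs.take k ++ [c] := by
        rw [List.take_add_one]
        simp [hget]
      rw [htake, hdrop']
      by_cases h1 : c = '.'
      · subst h1
        simp [Sgreat, Sless, List.count_append]
      · by_cases h2 : c = '>'
        · subst h2
          simp [Sgreat, Sless, List.count_append] <;> ring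
        · by_cases h3 : c = '<'
          · subst h3
            simp [Sgreat, Sless, List.count_append] <;> ring
          · simp [Sgreat, Sless, List.count_append, h1, h2, h3]

theorem count_photos_alt_eq_sums (road : String) :
    count_photos_alt road = Sgreat road.toList + Sless road.toList 0 := by
  unfold count_photos_alt
  have h := foldB_eq road.toList road.toList 0 0 (by simp)
  simpa using h

-- ===== VERDICT (by name: the statement is the Claim_ definition above) =====
theorem count_photos_spec : Claim_equal_count_photos := by
  intro road _
  unfold Spec_count_photos
  rw [count_photos_alt_eq_sums, count_photos_eq_sums, photoSum_gt, photoSum_lt]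
  ring
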